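-- pv_equiv track=rewrite | github.com/up700/GuJiNER | utils/fusion_func.py | mask_labels
-- ===== SOURCE A (Python) =====
-- def mask_labels(label_lst, length):
--     start = None
--     label_lst_new = []
--     for idx in range(len(label_lst)):
--         if label_lst[idx] == "O":
--             if start is not None:
--                 if length:
--                     if idx-start > 2:
--                         label_lst_new += label_lst[start:idx]
--                     else:
--                         label_lst_new += ["O"]*(idx-start)
--                 else:
--                     if idx-start <= 2:
--                         label_lst_new += label_lst[start:idx]
--                     else:
--                         label_lst_new += ["O"]*(idx-start)
--                 start = None
--             label_lst_new.append("O")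
--         elif label_lst[idx].startswith("B-"):
--             if start is not None:
--                 if length:
--                     if idx-start > 2:
--                         label_lst_new += label_lst[start:idx]
--                     else:
--                         label_lst_new += ["O"]*(idx-start)
--                 else:
--                     if idx-start <= 2:
--                         label_lst_new += label_lst[start:idx]
--                     else:
--                         label_lst_new += ["O"]*(idx-start)
--             start = idx
--
--     idx = len(label_lst)
--
--     if start is not None:
--         if length:
--             if idx-start > 2:
--                 label_lst_new += label_lst[start:idx]
--             else:
--                 label_lst_new += ["O"]*(idx-start)
--         else:
--             if idx-start <= 2:
--                 label_lst_new += label_lst[start:idx]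
--             else:
--                 label_lst_new += ["O"]*(idx-start)
--
--     return label_lst_new
-- ===== SOURCE B (Python) =====
-- def mask_labels(label_lst, length):
--     # Pass 1: segment into chunks: ["O"] for each standalone O, and one span list
--     # per "B-..." opening (collecting following tokens until the next O/B- or end);
--     # tokens seen while no span is open and not O/B- are dropped.
--     chunks = []
--     cur = None
--     for lab in label_lst:
--         if lab == "O":
--             if cur is not None:
--                 chunks.append(cur)
--                 cur = None
--             chunks.append(["O"])
--         elif lab.startswith("B-"):
--             if cur is not None:
--                 chunks.append(cur)
--             cur = [lab]
--         elif cur is not None: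
--             cur.append(lab)
--     if cur is not None:
--         chunks.append(cur)
--     # Pass 2: keep a chunk of length L when (length and L > 2) or (not length and L <= 2),
--     # otherwise replace it by ["O"]*L.  (An ["O"] chunk is unchanged either way.)
--     out = []
--     for ch in chunks:
--         L = len(ch)
--         if (length and L > 2) or (not length and L <= 2):
--             out += ch
--         else:
--             out += ["O"] * L
--     return out
-- ===== Notes on version B (the rewrite author's own statement) =====
-- stated objective: simpler
-- what changed: Replaces A's index/slice state machine with three duplicated inline flush blocks by a two-pass decomposition: one segmentation pass building chunks, then one uniform keep-or-mask transform over the chunks.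
import Mathlib
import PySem

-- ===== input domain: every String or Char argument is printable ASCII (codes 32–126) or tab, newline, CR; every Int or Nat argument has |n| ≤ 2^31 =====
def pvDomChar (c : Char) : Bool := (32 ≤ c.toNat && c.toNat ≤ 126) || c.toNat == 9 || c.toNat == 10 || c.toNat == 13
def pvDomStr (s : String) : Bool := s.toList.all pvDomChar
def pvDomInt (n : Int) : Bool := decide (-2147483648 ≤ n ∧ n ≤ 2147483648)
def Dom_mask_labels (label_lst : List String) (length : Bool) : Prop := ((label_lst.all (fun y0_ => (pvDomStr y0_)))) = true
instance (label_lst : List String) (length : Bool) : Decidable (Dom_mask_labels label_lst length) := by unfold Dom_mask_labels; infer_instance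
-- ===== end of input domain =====

-- B replaces A's index/slice state machine (three duplicated inline flush blocks) by a
-- two-pass decomposition: one segmentation pass into chunks, then one keep-or-mask map.

-- ===== PORT A =====
-- the flush body A repeats three times (slice or "O"-run, by the length flag)
def maskFlush (label_lst : List String) (length : Bool) (start idx : Nat) : List String :=
  if length then
    if (idx : Int) - (start : Int) > 2 then
      PySem.List.slice label_lst (some (start : Int)) (some (idx : Int))
    else
      List.replicate (idx - start) "O"
  else
    if (idx : Int) - (start : Int) ≤ 2 then
      PySem.List.slice label_lst (some (start : Int)) (some (idx : Int))
    else
      List.replicate (idx - start) "O"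

-- "if start is not None: <flush>" as it appears at all three sites
def flushIfOpen (label_lst : List String) (length : Bool) (start : Option Nat) (idx : Nat)
    (out : List String) : List String :=
  match start with
  | some s => out ++ maskFlush label_lst length s idx
  | none => out

-- A's for-loop over idx in range(len(label_lst)) with state (start, label_lst_new)
def maskA_loop (label_lst : List String) (length : Bool) (idx : Nat) (start : Option Nat)
    (out : List String) : List String :=
  if h : idx < label_lst.length then
    let lab := label_lst[idx]
    if lab == "O" then
      maskA_loop label_lst length (idx + 1) none
        (flushIfOpen label_lst length start idx out ++ ["O"])
    else if PySem.Str.startswith lab "B-" then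
      maskA_loop label_lst length (idx + 1) (some idx)
        (flushIfOpen label_lst length start idx out)
    else
      maskA_loop label_lst length (idx + 1) start out
  else
    flushIfOpen label_lst length start label_lst.length out
termination_by label_lst.length - idx

def mask_labels (label_lst : List String) (length : Bool) : List String :=
  maskA_loop label_lst length 0 none []

-- ===== PORT B =====
-- pass 1 step: ["O"] chunk per O token, open a span at "B-", extend an open span, drop otherwise
def segStep (st : List (List String) × Option (List String)) (lab : String) :
    List (List String) × Option (List String) :=
  if lab == "O" then
    ((match st.2 with
      | some c => st.1 ++ [c]
      | none => st.1) ++ [["O"]], none)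
  else if PySem.Str.startswith lab "B-" then
    ((match st.2 with
      | some c => st.1 ++ [c]
      | none => st.1), some [lab])
  else
    match st.2 with
    | some c => (st.1, some (c ++ [lab]))
    | none => st

-- pass 2: keep a chunk of length L iff (length and L > 2) or (not length and L <= 2)
def tfChunk (length : Bool) (ch : List String) : List String :=
  if (length && decide (ch.length > 2)) || (!length && decide (ch.length ≤ 2)) then ch
  else List.replicate ch.length "O"

def mask_labels_alt (label_lst : List String) (length : Bool) : List String :=
  let st := label_lst.foldl segStep ([], none)
  let chunks := st.1 ++ (match st.2 with
    | some c => [c]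
    | none => [])
  chunks.foldl (fun out ch => out ++ tfChunk length ch) []

-- ===== PRECONDITION & SPEC =====
def Spec_mask_labels (label_lst : List String) (length : Bool) (out : List String) : Prop := out = mask_labels_alt label_lst length
instance (label_lst : List String) (length : Bool) (out : List String) : Decidable (Spec_mask_labels label_lst length out) := by unfold Spec_mask_labels; infer_instance

-- ===== CLAIM (what is proved, stated in full; the proofs are below) =====
def Claim_equal_mask_labels : Prop := ∀ (label_lst : List String) (length : Bool), Dom_mask_labels label_lst length → Spec_mask_labels label_lst length (mask_labels label_lst length)

-- ===== LEMMAS AND PROOFS =====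

theorem tfChunk_O (length : Bool) : tfChunk length [("O" : String)] = ["O"] := by
  cases length <;> decide

-- A's flush equals B's transform on the corresponding chunk
theorem maskFlush_eq_tfChunk (label_lst : List String) (length : Bool) (s idx : Nat)
    (hs : s ≤ idx) (hidx : idx ≤ label_lst.length) :
    maskFlush label_lst length s idx = tfChunk length ((label_lst.drop s).take (idx - s)) := by
  have hslice : PySem.List.slice label_lst (some (s : Int)) (some (idx : Int))
      = (label_lst.drop s).take (idx - s) := PySem.List.slice_natCast label_lst s idx
  have hlen : ((label_lst.drop s).take (idx - s)).length = idx - s := by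
    simp [List.length_take, List.length_drop]; omega
  unfold maskFlush tfChunk
  rw [hlen, hslice]
  cases length <;> simp <;> split_ifs <;> first | rfl | omega

-- the open chunk grows by label_lst[idx]
theorem take_succ_chunk (label_lst : List String) (s idx : Nat) (hs : s ≤ idx)
    (h : idx < label_lst.length) :
    (label_lst.drop s).take (idx + 1 - s)
      = (label_lst.drop s).take (idx - s) ++ [label_lst[idx]] := by
  have h1 : idx + 1 - s = (idx - s) + 1 := by omega
  rw [h1, List.take_add_one]
  have h2 : (label_lst.drop s)[idx - s]? = some label_lst[idx] := by
    rw [List.getElem?_drop]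
    have : s + (idx - s) = idx := by omega
    rw [this, List.getElem?_eq_getElem h]
  simp [h2]

-- main invariant: A's loop from idx with open span start equals B's segmentation of the
-- suffix continued from (chunks, the open chunk so far), flushed and transformed
theorem loop_eq (label_lst : List String) (length : Bool) :
    ∀ (k idx : Nat) (chunks : List (List String)) (start : Option Nat),
      label_lst.length = idx + k →
      (∀ s, start = some s → s ≤ idx) →
      maskA_loop label_lst length idx start (chunks.flatMap (tfChunk length))
        = (((label_lst.drop idx).foldl segStep
              (chunks, start.map (fun s => (label_lst.drop s).take (idx - s)))).1
            ++ ((label_lst.drop idx).foldl segStep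
              (chunks, start.map (fun s => (label_lst.drop s).take (idx - s)))).2.toList
          ).flatMap (tfChunk length) := by
  intro k
  induction k with
  | zero =>
    intro idx chunks start hlen hstart
    have hidx : ¬ idx < label_lst.length := by omega
    rw [maskA_loop.eq_def, dif_neg hidx]
    have hdrop : label_lst.drop idx = [] := List.drop_eq_nil_of_le (by omega)
    rw [hdrop]
    simp only [List.foldl_nil]
    have hidx' : idx = label_lst.length := by omega
    subst hidx'
    cases start with
    | none => simp [flushIfOpen]
    | some s =>
      simp only [flushIfOpen, Option.map_some, Option.toList_some]
      rw [maskFlush_eq_tfChunk label_lst length s label_lst.length (hstart s rfl) le_rfl]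
      simp [List.flatMap_append]
  | succ k ih =>
    intro idx chunks start hlen hstart
    have hidx : idx < label_lst.length := by omega
    have hdrop : label_lst.drop idx = label_lst[idx] :: label_lst.drop (idx + 1) :=
      List.drop_eq_getElem_cons hidx
    rw [maskA_loop.eq_def, dif_pos hidx]
    rw [hdrop]
    simp only [List.foldl_cons]
    have hflush : flushIfOpen label_lst length start idx (chunks.flatMap (tfChunk length))
        = (chunks ++ (start.map (fun s => (label_lst.drop s).take (idx - s))).toList
          ).flatMap (tfChunk length) := by
      cases start with
      | none => simp [flushIfOpen]
      | some s =>
        simp only [flushIfOpen, Option.map_some, Option.toList_some]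
        rw [maskFlush_eq_tfChunk label_lst length s idx (hstart s rfl) (le_of_lt hidx)]
        simp [List.flatMap_append]
    by_cases hO : label_lst[idx] == "O"
    · rw [if_pos hO]
      have hseg : segStep (chunks, start.map (fun s => (label_lst.drop s).take (idx - s)))
            label_lst[idx]
          = ((chunks ++ (start.map (fun s => (label_lst.drop s).take (idx - s))).toList)
              ++ [["O"]], none) := by
        cases start <;> simp [segStep, hO]
      rw [hseg, hflush]
      rw [show (chunks ++ (start.map (fun s => (label_lst.drop s).take (idx - s))).toList
              ).flatMap (tfChunk length) ++ ["O"]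
            = ((chunks ++ (start.map (fun s => (label_lst.drop s).take (idx - s))).toList)
                ++ [["O"]]).flatMap (tfChunk length) from by
        simp [List.flatMap_append, tfChunk_O]]
      exact ih (idx + 1) _ none (by omega) (by intro s h; cases h)
    · have hO' : (label_lst[idx] == "O") = false := by simpa using hO
      rw [if_neg hO]
      by_cases hB : PySem.Str.startswith label_lst[idx] "B-"
      · rw [if_pos hB]
        have hB' : PySem.Chars.startswith label_lst[idx].toList ['B', '-'] = true := by
          simpa using hB
        have hseg : segStep (chunks, start.map (fun s => (label_lst.drop s).take (idx - s)))
              label_lst[idx]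
            = (chunks ++ (start.map (fun s => (label_lst.drop s).take (idx - s))).toList,
               some [label_lst[idx]]) := by
          cases start <;> simp [segStep, hO', hB']
        have hone : (label_lst.drop idx).take 1 = [label_lst[idx]] := by
          rw [hdrop]; rfl
        have hnew : (some [label_lst[idx]] : Option (List String))
            = (some idx).map (fun s => (label_lst.drop s).take (idx + 1 - s)) := by
          simp [hone]
        rw [hseg, hflush, hnew]
        exact ih (idx + 1) _ (some idx) (by omega)
          (by intro s h; injection h with h; omega)
      · rw [if_neg hB]
        have hB' : PySem.Chars.startswith label_lst[idx].toList ['B', '-'] = false := by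
          simpa using hB
        have hseg : segStep (chunks, start.map (fun s => (label_lst.drop s).take (idx - s)))
              label_lst[idx]
            = (chunks, start.map (fun s => (label_lst.drop s).take (idx + 1 - s))) := by
          cases start with
          | none => simp [segStep, hO', hB']
          | some s =>
            simp only [Option.map_some, segStep, hO', Bool.false_eq_true, if_false]
            rw [if_neg hB, take_succ_chunk label_lst s idx (hstart s rfl) hidx]
        rw [hseg]
        exact ih (idx + 1) chunks start (by omega)
          (by intro s h; have := hstart s h; omega)

-- ===== VERDICT (by name: the statement is the Claim_ definition above) =====
theorem mask_labels_spec : Claim_equal_mask_labels := by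
  intro label_lst length _
  unfold Spec_mask_labels mask_labels mask_labels_alt
  have h := loop_eq label_lst length label_lst.length 0 [] none (by omega)
    (by intro s h; cases h)
  simp only [List.flatMap_nil, List.drop_zero, Option.map_none] at h
  rw [h]
  rw [PySem.List.foldl_append_eq_flatMap]
  cases (label_lst.foldl segStep ([], none)).2 <;> simp
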